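-- pv_equiv track=rewrite | github.com/adarshkumar23/complivibe-core | scripts/normalize_obligations.py | normalize_who
-- ===== SOURCE A (Python) =====
-- def normalize_who(val: str) -> str:
--     if not val:
--         return "unknown"
--     v = val.lower()
--     if "provider" in v or "manufacturer" in v:
--         return "provider"
--     elif "deploy" in v or "employer" in v or "user" in v:
--         return "deployer"
--     elif "importer" in v:
--         return "importer"
--     elif "distributor" in v:
--         return "distributor"
--     elif "fiduciary" in v or "controller" in v:
--         return "data_fiduciary"
--     elif "processor" in v:
--         return "data_processor"
--     elif any(k in v for k in ["authority", "commission", "notified", "member state", "board", "office", "enisa", "member states"]):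
--         return "competent_authority"
--     elif "all" in v or "any" in v or "everyone" in v:
--         return "all"
--     return val
-- ===== SOURCE B (Python) =====
-- # Single left-to-right scan over the lowered text: at each position check which
-- # keywords start there and keep the minimum category priority seen; category
-- # priority resolution by min replaces A's ordered branch chain.
-- KEYWORDS = {
--     "provider": 0, "manufacturer": 0,
--     "deploy": 1, "employer": 1, "user": 1,
--     "importer": 2,
--     "distributor": 3,
--     "fiduciary": 4, "controller": 4,
--     "processor": 5,
--     "authority": 6, "commission": 6, "notified": 6, "member state": 6,
--     "board": 6, "office": 6, "enisa": 6, "member states": 6,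
--     "all": 7, "any": 7, "everyone": 7,
-- }
-- CATS = ["provider", "deployer", "importer", "distributor", "data_fiduciary",
--         "data_processor", "competent_authority", "all"]
--
--
-- def normalize_who(val: str) -> str:
--     if not val:
--         return "unknown"
--     v = val.lower()
--     best = len(CATS)
--     for i in range(len(v)):
--         for kw, pri in KEYWORDS.items():
--             if pri < best and v.startswith(kw, i):
--                 best = pri
--     return CATS[best] if best < len(CATS) else val
-- ===== Notes on version B (the rewrite author's own statement) =====
-- stated objective: alternative
-- what changed: Replaces A's keyword-driven if/elif chain of substring tests with a text-driven single left-to-right scan: at each position of the lowered string B checks which keywords start there (startswith) and keeps the minimum category priority, resolving A's branch order by a min accumulator instead of ordered branches.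
import Mathlib
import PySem

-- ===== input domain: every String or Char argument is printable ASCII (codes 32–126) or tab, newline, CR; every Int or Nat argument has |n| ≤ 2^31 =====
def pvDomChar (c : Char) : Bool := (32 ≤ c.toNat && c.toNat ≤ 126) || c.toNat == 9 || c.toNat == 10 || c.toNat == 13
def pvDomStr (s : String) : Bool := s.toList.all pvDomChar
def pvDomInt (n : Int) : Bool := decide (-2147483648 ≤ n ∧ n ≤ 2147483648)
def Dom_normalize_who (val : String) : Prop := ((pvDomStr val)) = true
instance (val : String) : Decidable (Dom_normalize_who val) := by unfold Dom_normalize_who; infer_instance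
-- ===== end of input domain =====

-- B replaces A's ordered if/elif substring chain by a positional scan of the text
-- with a min-priority accumulator; same return value (objective: alternative).

-- ===== PORT A =====
def normalize_who (val : String) : String :=
  if PySem.Str.len val == 0 then "unknown"
  else
    let v := PySem.Str.lower val
    if PySem.Str.isIn "provider" v || PySem.Str.isIn "manufacturer" v then "provider"
    else if PySem.Str.isIn "deploy" v || PySem.Str.isIn "employer" v || PySem.Str.isIn "user" v then "deployer"
    else if PySem.Str.isIn "importer" v then "importer"
    else if PySem.Str.isIn "distributor" v then "distributor"
    else if PySem.Str.isIn "fiduciary" v || PySem.Str.isIn "controller" v then "data_fiduciary"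
    else if PySem.Str.isIn "processor" v then "data_processor"
    else if ["authority", "commission", "notified", "member state", "board", "office", "enisa", "member states"].any (fun k => PySem.Str.isIn k v) then "competent_authority"
    else if PySem.Str.isIn "all" v || PySem.Str.isIn "any" v || PySem.Str.isIn "everyone" v then "all"
    else val

-- ===== PORT B =====
-- KEYWORDS dict in insertion order, keyword ↦ category priority
def pvKeywords : List (List Char × Nat) :=
  [ ("provider".toList, 0), ("manufacturer".toList, 0),
    ("deploy".toList, 1), ("employer".toList, 1), ("user".toList, 1),
    ("importer".toList, 2),
    ("distributor".toList, 3),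
    ("fiduciary".toList, 4), ("controller".toList, 4),
    ("processor".toList, 5),
    ("authority".toList, 6), ("commission".toList, 6), ("notified".toList, 6),
    ("member state".toList, 6), ("board".toList, 6), ("office".toList, 6),
    ("enisa".toList, 6), ("member states".toList, 6),
    ("all".toList, 7), ("any".toList, 7), ("everyone".toList, 7) ]

def pvCats : List String :=
  ["provider", "deployer", "importer", "distributor", "data_fiduciary",
   "data_processor", "competent_authority", "all"]

-- inner loop: for kw, pri in KEYWORDS.items(): if pri < best and v.startswith(kw, i): best = pri
-- (v.startswith(kw, i) for 0 ≤ i is exactly kw.isPrefixOf (v.drop i))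
def pvStep (v : List Char) (i : Nat) (b : Nat) : Nat :=
  pvKeywords.foldl (fun b kp => if kp.2 < b && kp.1.isPrefixOf (v.drop i) then kp.2 else b) b

-- outer loop: for i in range(len(v)) with best = len(CATS) = 8
def pvBest (v : List Char) : Nat :=
  (List.range v.length).foldl (fun b i => pvStep v i b) 8

def normalize_who_alt (val : String) : String :=
  if PySem.Str.len val == 0 then "unknown"
  else
    let v := (PySem.Str.lower val).toList
    let best := pvBest v
    if best < pvCats.length then pvCats.getD best val else val

-- ===== PRECONDITION & SPEC =====
def Spec_normalize_who (val : String) (out : String) : Prop := out = normalize_who_alt val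
instance (val : String) (out : String) : Decidable (Spec_normalize_who val out) := by unfold Spec_normalize_who; infer_instance

-- ===== CLAIM (what is proved, stated in full; the proofs are below) =====
def Claim_equal_normalize_who : Prop := ∀ (val : String), Dom_normalize_who val → Spec_normalize_who val (normalize_who val)

-- ===== LEMMAS AND PROOFS =====

-- a keyword of priority p starts at some in-range position of v
def pvMatched (v : List Char) (p : Nat) : Prop :=
  ∃ kp ∈ pvKeywords, kp.2 = p ∧ ∃ i < v.length, kp.1 <+: v.drop i

lemma pvStepFold_le (v : List Char) (i : Nat) (ks : List (List Char × Nat)) (b : Nat) :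
    ks.foldl (fun b kp => if kp.2 < b && kp.1.isPrefixOf (v.drop i) then kp.2 else b) b ≤ b := by
  induction ks generalizing b with
  | nil => simp [List.foldl]
  | cons kp ks ih =>
    simp only [List.foldl]
    by_cases hc : (kp.2 < b && kp.1.isPrefixOf (v.drop i)) = true
    · rw [if_pos hc]
      have h1 := ih kp.2
      have h2 : kp.2 < b := by simp at hc; exact hc.1
      omega
    · rw [if_neg hc]; exact ih b

lemma pvStepFold_le_of_mem (v : List Char) (i : Nat) (ks : List (List Char × Nat)) (b : Nat)
    (kp : List Char × Nat) (hm : kp ∈ ks) (hp : kp.1 <+: v.drop i) :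
    ks.foldl (fun b kp => if kp.2 < b && kp.1.isPrefixOf (v.drop i) then kp.2 else b) b ≤ kp.2 := by
  induction ks generalizing b with
  | nil => cases hm
  | cons q ks ih =>
    simp only [List.foldl]
    rcases List.mem_cons.mp hm with h | h
    · subst h
      by_cases hb : kp.2 < b
      · have hc : (kp.2 < b && kp.1.isPrefixOf (v.drop i)) = true := by
          simp [hb, List.isPrefixOf_iff_prefix.mpr hp]
        rw [if_pos hc]
        exact pvStepFold_le v i ks kp.2
      · have hc : ¬ (kp.2 < b && kp.1.isPrefixOf (v.drop i)) = true := by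
          simp; intro h; omega
        rw [if_neg hc]
        exact le_trans (pvStepFold_le v i ks b) (by omega)
    · by_cases hc : (q.2 < b && q.1.isPrefixOf (v.drop i)) = true
      · rw [if_pos hc]; exact ih _ h
      · rw [if_neg hc]; exact ih _ h

lemma pvStepFold_cases (v : List Char) (i : Nat) (ks : List (List Char × Nat)) (b : Nat) :
    ks.foldl (fun b kp => if kp.2 < b && kp.1.isPrefixOf (v.drop i) then kp.2 else b) b = b ∨
    ∃ kp ∈ ks, kp.1 <+: v.drop i ∧
      ks.foldl (fun b kp => if kp.2 < b && kp.1.isPrefixOf (v.drop i) then kp.2 else b) b = kp.2 := by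
  induction ks generalizing b with
  | nil => left; rfl
  | cons q ks ih =>
    simp only [List.foldl]
    by_cases hc : (q.2 < b && q.1.isPrefixOf (v.drop i)) = true
    · rw [if_pos hc]
      have hpre : q.1 <+: v.drop i :=
        List.isPrefixOf_iff_prefix.mp (Bool.and_elim_right hc)
      rcases ih q.2 with h | ⟨kp, hmm, hpp, he⟩
      · right; exact ⟨q, List.mem_cons_self, hpre, h⟩
      · right; exact ⟨kp, List.mem_cons_of_mem _ hmm, hpp, he⟩
    · rw [if_neg hc]
      rcases ih b with h | ⟨kp, hmm, hpp, he⟩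
      · left; exact h
      · right; exact ⟨kp, List.mem_cons_of_mem _ hmm, hpp, he⟩

lemma pvStep_le (v : List Char) (i : Nat) (b : Nat) : pvStep v i b ≤ b := by
  unfold pvStep; exact pvStepFold_le v i pvKeywords b

lemma pvStep_le_of_mem (v : List Char) (i : Nat) (b : Nat) (kp : List Char × Nat)
    (hm : kp ∈ pvKeywords) (hp : kp.1 <+: v.drop i) : pvStep v i b ≤ kp.2 := by
  unfold pvStep; exact pvStepFold_le_of_mem v i pvKeywords b kp hm hp

lemma pvStep_cases (v : List Char) (i : Nat) (b : Nat) :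
    pvStep v i b = b ∨ ∃ kp ∈ pvKeywords, kp.1 <+: v.drop i ∧ pvStep v i b = kp.2 := by
  unfold pvStep; exact pvStepFold_cases v i pvKeywords b

lemma pvOuter_le (v : List Char) (l : List Nat) (b : Nat) :
    l.foldl (fun b i => pvStep v i b) b ≤ b := by
  induction l generalizing b with
  | nil => simp [List.foldl]
  | cons i l ih =>
    simp only [List.foldl]
    exact le_trans (ih _) (pvStep_le v i b)

lemma pvOuter_le_of (v : List Char) (l : List Nat) (b : Nat) (i : Nat) (hi : i ∈ l)
    (kp : List Char × Nat) (hm : kp ∈ pvKeywords) (hp : kp.1 <+: v.drop i) :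
    l.foldl (fun b i => pvStep v i b) b ≤ kp.2 := by
  induction l generalizing b with
  | nil => cases hi
  | cons j l ih =>
    simp only [List.foldl]
    rcases List.mem_cons.mp hi with h | h
    · subst h
      exact le_trans (pvOuter_le v l _) (pvStep_le_of_mem v i b kp hm hp)
    · exact ih _ h

lemma pvOuter_cases (v : List Char) (l : List Nat) (b : Nat) :
    l.foldl (fun b i => pvStep v i b) b = b ∨
    ∃ i ∈ l, ∃ kp ∈ pvKeywords, kp.1 <+: v.drop i ∧
      l.foldl (fun b i => pvStep v i b) b = kp.2 := by
  induction l generalizing b with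
  | nil => left; rfl
  | cons j l ih =>
    simp only [List.foldl]
    rcases ih (pvStep v j b) with h | ⟨i, hi, kp, hm, hp, he⟩
    · rw [h]
      rcases pvStep_cases v j b with h2 | ⟨kp, hm, hp, he⟩
      · left; exact h2
      · right; exact ⟨j, List.mem_cons_self, kp, hm, hp, he⟩
    · right; exact ⟨i, List.mem_cons_of_mem _ hi, kp, hm, hp, he⟩

lemma pvBest_le (v : List Char) : pvBest v ≤ 8 := pvOuter_le v _ 8

lemma pvBest_le_of_matched (v : List Char) (p : Nat) (h : pvMatched v p) : pvBest v ≤ p := by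
  obtain ⟨kp, hm, hq, i, hi, hp⟩ := h
  subst hq
  exact pvOuter_le_of v _ 8 i (List.mem_range.mpr hi) kp hm hp

lemma pvBest_cases (v : List Char) : pvBest v = 8 ∨ pvMatched v (pvBest v) := by
  rcases pvOuter_cases v (List.range v.length) 8 with h | ⟨i, hi, kp, hm, hp, he⟩
  · left; exact h
  · right; exact ⟨kp, hm, he.symm, i, List.mem_range.mp hi, hp⟩

-- a nonempty keyword is an infix iff it starts at some in-range drop position
lemma pvInfix_drop (sub v : List Char) (hne : sub ≠ []) :
    sub <:+: v ↔ ∃ i < v.length, sub <+: v.drop i := by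
  constructor
  · intro h
    obtain ⟨s, t, rfl⟩ := h
    refine ⟨s.length, ?_, ?_⟩
    · have : sub.length ≠ 0 := by simpa using hne
      simp [List.length_append]; omega
    · simp
  · rintro ⟨i, _, h⟩
    exact h.isInfix.trans (List.drop_suffix i v).isInfix

-- pvMatched restated through Chars.isIn
lemma pvMatched_iff (v : List Char) (p : Nat) :
    pvMatched v p ↔ ∃ kp ∈ pvKeywords, kp.2 = p ∧ PySem.Chars.isIn kp.1 v = true := by
  unfold pvMatched
  constructor
  · rintro ⟨kp, hm, hq, i, hi, hp⟩
    refine ⟨kp, hm, hq, ?_⟩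
    exact (PySem.Chars.exists_prefix_drop_iff_isIn kp.1 v).mp ⟨i, hp⟩
  · rintro ⟨kp, hm, hq, hin⟩
    have hinf : kp.1 <:+: v := (PySem.Chars.isIn_iff_infix kp.1 v).mp hin
    have hne : kp.1 ≠ [] := by
      fin_cases hm <;> simp
    exact ⟨kp, hm, hq, (pvInfix_drop kp.1 v hne).mp hinf⟩

lemma pvM (v : List Char) (kw : List Char) (p : Nat) (hmem : (kw, p) ∈ pvKeywords)
    (h : PySem.Chars.isIn kw v = true) : pvMatched v p :=
  (pvMatched_iff v p).mpr ⟨(kw, p), hmem, rfl, h⟩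

set_option maxHeartbeats 2000000 in
lemma pvBest_chain (v : List Char) :
    pvBest v =
      (if PySem.Chars.isIn "provider".toList v || PySem.Chars.isIn "manufacturer".toList v then 0
      else if PySem.Chars.isIn "deploy".toList v || PySem.Chars.isIn "employer".toList v || PySem.Chars.isIn "user".toList v then 1
      else if PySem.Chars.isIn "importer".toList v then 2
      else if PySem.Chars.isIn "distributor".toList v then 3
      else if PySem.Chars.isIn "fiduciary".toList v || PySem.Chars.isIn "controller".toList v then 4
      else if PySem.Chars.isIn "processor".toList v then 5
      else if PySem.Chars.isIn "authority".toList v || PySem.Chars.isIn "commission".toList v || PySem.Chars.isIn "notified".toList v || PySem.Chars.isIn "member state".toList v || PySem.Chars.isIn "board".toList v || PySem.Chars.isIn "office".toList v || PySem.Chars.isIn "enisa".toList v || PySem.Chars.isIn "member states".toList v then 6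
      else if PySem.Chars.isIn "all".toList v || PySem.Chars.isIn "any".toList v || PySem.Chars.isIn "everyone".toList v then 7
      else 8 : Nat) := by
  have hle8 := pvBest_le v
  split_ifs with h0 h1 h2 h3 h4 h5 h6 h7
  · have hm : pvMatched v 0 := by
      simp only [Bool.or_eq_true] at h0
      rcases h0 with h | h <;> exact pvM v _ 0 (by simp [pvKeywords]) h
    have hle := pvBest_le_of_matched v 0 hm
    omega
  · have hm : pvMatched v 1 := by
      simp only [Bool.or_eq_true] at h1
      rcases h1 with (h | h) | h <;> exact pvM v _ 1 (by simp [pvKeywords]) h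
    have hle := pvBest_le_of_matched v 1 hm
    rcases pvBest_cases v with h8 | hm'
    · omega
    · obtain ⟨kp, hmem, hq, hin⟩ := (pvMatched_iff v _).mp hm'
      fin_cases hmem <;> simp_all <;> omega
  · have hm : pvMatched v 2 := pvM v _ 2 (by simp [pvKeywords]) h2
    have hle := pvBest_le_of_matched v 2 hm
    rcases pvBest_cases v with h8 | hm'
    · omega
    · obtain ⟨kp, hmem, hq, hin⟩ := (pvMatched_iff v _).mp hm'
      fin_cases hmem <;> simp_all <;> omega
  · have hm : pvMatched v 3 := pvM v _ 3 (by simp [pvKeywords]) h3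
    have hle := pvBest_le_of_matched v 3 hm
    rcases pvBest_cases v with h8 | hm'
    · omega
    · obtain ⟨kp, hmem, hq, hin⟩ := (pvMatched_iff v _).mp hm'
      fin_cases hmem <;> simp_all <;> omega
  · have hm : pvMatched v 4 := by
      simp only [Bool.or_eq_true] at h4
      rcases h4 with h | h <;> exact pvM v _ 4 (by simp [pvKeywords]) h
    have hle := pvBest_le_of_matched v 4 hm
    rcases pvBest_cases v with h8 | hm'
    · omega
    · obtain ⟨kp, hmem, hq, hin⟩ := (pvMatched_iff v _).mp hm'
      fin_cases hmem <;> simp_all <;> omega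
  · have hm : pvMatched v 5 := pvM v _ 5 (by simp [pvKeywords]) h5
    have hle := pvBest_le_of_matched v 5 hm
    rcases pvBest_cases v with h8 | hm'
    · omega
    · obtain ⟨kp, hmem, hq, hin⟩ := (pvMatched_iff v _).mp hm'
      fin_cases hmem <;> simp_all <;> omega
  · have hm : pvMatched v 6 := by
      simp only [Bool.or_eq_true] at h6
      rcases h6 with ((((((h | h) | h) | h) | h) | h) | h) | h <;> exact pvM v _ 6 (by simp [pvKeywords]) h
    have hle := pvBest_le_of_matched v 6 hm
    rcases pvBest_cases v with h8 | hm'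
    · omega
    · obtain ⟨kp, hmem, hq, hin⟩ := (pvMatched_iff v _).mp hm'
      fin_cases hmem <;> simp_all <;> omega
  · have hm : pvMatched v 7 := by
      simp only [Bool.or_eq_true] at h7
      rcases h7 with (h | h) | h <;> exact pvM v _ 7 (by simp [pvKeywords]) h
    have hle := pvBest_le_of_matched v 7 hm
    rcases pvBest_cases v with h8 | hm'
    · omega
    · obtain ⟨kp, hmem, hq, hin⟩ := (pvMatched_iff v _).mp hm'
      fin_cases hmem <;> simp_all
  · rcases pvBest_cases v with h8 | hm'
    · exact h8
    · obtain ⟨kp, hmem, hq, hin⟩ := (pvMatched_iff v _).mp hm'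
      fin_cases hmem <;> simp_all

-- ===== VERDICT (by name: the statement is the Claim_ definition above) =====
set_option maxHeartbeats 1000000 in
theorem normalize_who_spec : Claim_equal_normalize_who := by
  intro val _
  unfold Spec_normalize_who normalize_who normalize_who_alt
  by_cases hz : (PySem.Str.len val == 0) = true
  · have hv : val = "" := by simpa using hz
    subst hv; rfl
  · rw [if_neg hz, if_neg hz]
    simp only [pvBest_chain, PySem.Str.isIn_eq, List.any_cons, List.any_nil,
      Bool.or_false, Bool.or_eq_true, or_assoc]
    split_ifs
    all_goals first | rfl | simp [pvCats] | (exfalso; simp [pvCats] at *)
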